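-- pv_equiv track=rewrite | github.com/kavishkartha05/Anchor | src/anchor/loop.py | _extract_gap
-- ===== SOURCE A (Python) =====
-- def _extract_gap(content: str) -> tuple[str, str]:
--     gap = ""
--     context = ""
--     for line in content.splitlines():
--         line = line.strip()
--         if line.startswith("GAP:"):
--             gap = line[len("GAP:") :].strip()
--         elif line.startswith("CONTEXT:"):
--             context = line[len("CONTEXT:") :].strip()
--     return gap, context
-- ===== SOURCE B (Python) =====
-- def _extract_gap(content: str) -> tuple[str, str]:
--     gap = None
--     context = None
--     for line in reversed(content.splitlines()):
--         s = line.strip()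
--         if gap is None and s.startswith("GAP:"):
--             gap = s[len("GAP:"):].strip()
--         elif context is None and s.startswith("CONTEXT:"):
--             context = s[len("CONTEXT:"):].strip()
--         if gap is not None and context is not None:
--             break
--     return (gap if gap is not None else "", context if context is not None else "")
-- ===== Notes on version B (the rewrite author's own statement) =====
-- stated objective: alternative
-- what changed: B scans the lines in reverse and takes the first GAP/CONTEXT match for each (tracking Option state), breaking out as soon as both are found, instead of A's forward pass that overwrites to keep the last match.
import Mathlib
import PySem

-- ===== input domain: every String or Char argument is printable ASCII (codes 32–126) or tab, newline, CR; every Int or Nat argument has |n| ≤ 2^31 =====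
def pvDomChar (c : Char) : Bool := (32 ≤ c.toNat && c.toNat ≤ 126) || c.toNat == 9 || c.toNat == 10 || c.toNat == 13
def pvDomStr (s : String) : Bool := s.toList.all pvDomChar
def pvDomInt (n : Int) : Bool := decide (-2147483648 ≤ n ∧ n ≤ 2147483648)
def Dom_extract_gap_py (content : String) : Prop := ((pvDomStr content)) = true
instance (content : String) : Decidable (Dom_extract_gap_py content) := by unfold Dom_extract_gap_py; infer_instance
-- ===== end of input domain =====

-- B replaces A's forward overwrite-to-keep-last pass with a reverse scan that takes the
-- first match of each prefix and breaks early once both are found (objective: alternative).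

-- ===== PORT A =====
-- A's loop body: strip, update gap on "GAP:", else context on "CONTEXT:".
def extract_gap_py_step (st : String × String) (line : String) : String × String :=
  let s := PySem.Str.strip line
  if PySem.Str.startswith s "GAP:" then
    (PySem.Str.strip (PySem.Str.slice s (some 4) none), st.2)
  else if PySem.Str.startswith s "CONTEXT:" then
    (st.1, PySem.Str.strip (PySem.Str.slice s (some 8) none))
  else st

def extract_gap_py (content : String) : String × String :=
  (PySem.Str.splitlines content).foldl extract_gap_py_step ("", "")

-- ===== PORT B =====
-- B's loop over the reversed lines, Option state, break once both found.
def extract_gap_py_alt_loop : List String → Option String → Option String → Option String × Option String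
  | [], g, c => (g, c)
  | line :: rest, g, c =>
    let s := PySem.Str.strip line
    let gc :=
      if g.isNone && PySem.Str.startswith s "GAP:" then
        (some (PySem.Str.strip (PySem.Str.slice s (some 4) none)), c)
      else if c.isNone && PySem.Str.startswith s "CONTEXT:" then
        (g, some (PySem.Str.strip (PySem.Str.slice s (some 8) none)))
      else (g, c)
    if gc.1.isSome && gc.2.isSome then gc
    else extract_gap_py_alt_loop rest gc.1 gc.2

def extract_gap_py_alt (content : String) : String × String :=
  let gc := extract_gap_py_alt_loop (PySem.Str.splitlines content).reverse none none
  (gc.1.getD "", gc.2.getD "")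

-- ===== PRECONDITION & SPEC =====
def Spec_extract_gap_py (content : String) (out : String × String) : Prop := out = extract_gap_py_alt content
instance (content : String) (out : String × String) : Decidable (Spec_extract_gap_py content out) := by unfold Spec_extract_gap_py; infer_instance

-- ===== CLAIM (what is proved, stated in full; the proofs are below) =====
def Claim_equal_extract_gap_py : Prop := ∀ (content : String), Dom_extract_gap_py content → Spec_extract_gap_py content (extract_gap_py content)

-- ===== LEMMAS AND PROOFS =====

-- first "GAP:" match in a list of lines (used only in proofs)
def pvRG : List String → Option String
  | [] => none
  | l :: ls =>
    let s := PySem.Str.strip l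
    if PySem.Str.startswith s "GAP:" then some (PySem.Str.strip (PySem.Str.slice s (some 4) none))
    else pvRG ls

def pvRC : List String → Option String
  | [] => none
  | l :: ls =>
    let s := PySem.Str.strip l
    if PySem.Str.startswith s "CONTEXT:" then some (PySem.Str.strip (PySem.Str.slice s (some 8) none))
    else pvRC ls

-- a line cannot start with both "GAP:" and "CONTEXT:"
theorem pv_excl (cs : List Char)
    (h1 : PySem.Chars.startswith cs ['G', 'A', 'P', ':'] = true)
    (h2 : PySem.Chars.startswith cs ['C', 'O', 'N', 'T', 'E', 'X', 'T', ':'] = true) : False := by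
  rw [PySem.Chars.startswith_iff] at h1 h2
  obtain ⟨t1, e1⟩ := h1
  obtain ⟨t2, e2⟩ := h2
  rw [← e1] at e2
  simp at e2

theorem pvRG_append (xs ys : List String) : pvRG (xs ++ ys) = (pvRG xs).or (pvRG ys) := by
  induction xs with
  | nil => simp [pvRG]
  | cons l ls ih =>
    simp only [List.cons_append, pvRG, ih]
    split <;> simp

theorem pvRC_append (xs ys : List String) : pvRC (xs ++ ys) = (pvRC xs).or (pvRC ys) := by
  induction xs with
  | nil => simp [pvRC]
  | cons l ls ih =>
    simp only [List.cons_append, pvRC, ih]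
    split <;> simp

-- A's fold keeps the last match: characterised via pvRG/pvRC on the reversed list
theorem pvA_char (ls : List String) (g0 c0 : String) :
    ls.foldl extract_gap_py_step (g0, c0)
      = ((pvRG ls.reverse).getD g0, (pvRC ls.reverse).getD c0) := by
  induction ls generalizing g0 c0 with
  | nil => simp [pvRG, pvRC]
  | cons l ls ih =>
    simp only [List.foldl_cons, List.reverse_cons, pvRG_append, pvRC_append]
    rw [ih]
    by_cases hg : PySem.Chars.startswith (PySem.Chars.strip l.toList) ['G', 'A', 'P', ':'] = true
    · have hc : PySem.Chars.startswith (PySem.Chars.strip l.toList)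
          ['C', 'O', 'N', 'T', 'E', 'X', 'T', ':'] = false :=
        Bool.eq_false_iff.mpr (fun h => pv_excl _ hg h)
      simp [extract_gap_py_step, pvRG, pvRC, hg, hc]
    · simp only [Bool.not_eq_true] at hg
      by_cases hc : PySem.Chars.startswith (PySem.Chars.strip l.toList)
          ['C', 'O', 'N', 'T', 'E', 'X', 'T', ':'] = true
      · simp [extract_gap_py_step, pvRG, pvRC, hg, hc]
      · simp only [Bool.not_eq_true] at hc
        simp [extract_gap_py_step, pvRG, pvRC, hg, hc]

-- B's loop keeps the first match, seeded with the already-found options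
theorem pvB_char (ls : List String) (g c : Option String) :
    extract_gap_py_alt_loop ls g c = (g.or (pvRG ls), c.or (pvRC ls)) := by
  induction ls generalizing g c with
  | nil => simp [extract_gap_py_alt_loop, pvRG, pvRC]
  | cons l ls ih =>
    rw [extract_gap_py_alt_loop]
    by_cases hg : PySem.Chars.startswith (PySem.Chars.strip l.toList) ['G', 'A', 'P', ':'] = true
    · have hc : PySem.Chars.startswith (PySem.Chars.strip l.toList)
          ['C', 'O', 'N', 'T', 'E', 'X', 'T', ':'] = false :=
        Bool.eq_false_iff.mpr (fun h => pv_excl _ hg h)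
      cases g <;> cases c <;> simp [ih, pvRG, pvRC, hg, hc]
    · simp only [Bool.not_eq_true] at hg
      by_cases hc : PySem.Chars.startswith (PySem.Chars.strip l.toList)
          ['C', 'O', 'N', 'T', 'E', 'X', 'T', ':'] = true
      · cases g <;> cases c <;> simp [ih, pvRG, pvRC, hg, hc]
      · simp only [Bool.not_eq_true] at hc
        cases g <;> cases c <;> simp [ih, pvRG, pvRC, hg, hc]

-- ===== VERDICT (by name: the statement is the Claim_ definition above) =====
theorem extract_gap_py_spec : Claim_equal_extract_gap_py := by
  intro content _
  unfold Spec_extract_gap_py extract_gap_py extract_gap_py_alt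
  rw [pvA_char, pvB_char]
  cases pvRG (PySem.Str.splitlines content).reverse <;>
    cases pvRC (PySem.Str.splitlines content).reverse <;> simp
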